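-- pv_equiv track=rewrite | github.com/ydb-platform/ydb | contrib/python/starlette-admin/starlette_admin/tools/iter.py | iterdecode
-- ===== SOURCE A (Python) =====
-- from typing import Iterable, Tuple
--
-- CHAR_ESCAPE = "."
--
-- CHAR_SEPARATOR = ","
--
-- def iterdecode(value: str) -> Tuple[str, ...]:
--     """Decode an encoded string back to a tuple of string values."""
--     result = []
--     accumulator = ""
--
--     escaped = False
--
--     for char in value:
--         if not escaped:
--             if char == CHAR_ESCAPE:
--                 escaped = True
--                 continue
--             if char == CHAR_SEPARATOR:
--                 result.append(accumulator)
--                 accumulator = ""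
--                 continue
--         else:
--             escaped = False
--
--         accumulator += char
--
--     result.append(accumulator)
--
--     return tuple(result)
-- ===== SOURCE B (Python) =====
-- CHAR_ESCAPE = "."
--
-- CHAR_SEPARATOR = ","
--
-- def iterdecode(value):
--     # Stage 1: resolve escapes into a token list: plain characters, with None
--     # marking each unescaped separator (a trailing lone escape yields nothing).
--     units = []
--     i = 0
--     n = len(value)
--     while i < n:
--         ch = value[i]
--         if ch == CHAR_ESCAPE:
--             if i + 1 < n:
--                 units.append(value[i + 1])
--             i += 2
--         elif ch == CHAR_SEPARATOR:
--             units.append(None)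
--             i += 1
--         else:
--             units.append(ch)
--             i += 1
--     # Stage 2: assemble the parts back-to-front by a reversed sweep over the
--     # tokens; parts and their characters are collected reversed and flipped once.
--     parts_rev = [[]]
--     for u in reversed(units):
--         if u is None:
--             parts_rev.append([])
--         else:
--             parts_rev[-1].append(u)
--     return tuple("".join(reversed(p)) for p in reversed(parts_rev))
-- ===== Notes on version B (the rewrite author's own statement) =====
-- stated objective: alternative
-- what changed: Replaces A's single forward pass with an escaped flag and accumulator flushes by two staged passes: a tokenizer that resolves escapes into a token list with separator markers, then a reversed sweep that assembles the parts back-to-front by prepending.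
import Mathlib
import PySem

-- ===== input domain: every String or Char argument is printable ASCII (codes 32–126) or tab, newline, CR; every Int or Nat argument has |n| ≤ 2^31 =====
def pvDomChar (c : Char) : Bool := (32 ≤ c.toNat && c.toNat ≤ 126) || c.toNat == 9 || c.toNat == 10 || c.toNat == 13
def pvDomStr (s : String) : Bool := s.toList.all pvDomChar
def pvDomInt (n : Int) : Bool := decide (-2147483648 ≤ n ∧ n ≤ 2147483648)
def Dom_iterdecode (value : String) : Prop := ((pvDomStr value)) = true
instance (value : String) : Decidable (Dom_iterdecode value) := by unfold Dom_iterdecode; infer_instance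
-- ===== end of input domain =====

-- B replaces A's one-pass escaped-flag state machine by two staged passes: a tokenizer
-- resolving escapes into tokens (None = separator), then a reversed sweep assembling
-- the parts back-to-front (alternative decomposition; same return value).


-- ===== PORT A =====
-- A's for-loop over the characters with state (result, accumulator, escaped)
def iterdecodeGoA : List Char → List String → String → Bool → List String
  | [], res, acc, _ => res ++ [acc]
  | c :: rest, res, acc, esc =>
    if esc = false then
      if c = '.' then iterdecodeGoA rest res acc true
      else if c = ',' then iterdecodeGoA rest (res ++ [acc]) "" false
      else iterdecodeGoA rest res (acc.push c) false
    else iterdecodeGoA rest res (acc.push c) false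

def iterdecode (value : String) : List String :=
  iterdecodeGoA value.toList [] "" false

-- ===== PORT B =====
-- Stage 1: the index loop with lookahead, head of the list = current index
def iterdecodeUnits : List Char → List (Option Char)
  | [] => []
  | c :: rest =>
    if c = '.' then
      match rest with
      | [] => []                              -- trailing lone escape: nothing appended
      | c2 :: rest' => some c2 :: iterdecodeUnits rest'
    else if c = ',' then none :: iterdecodeUnits rest
    else some c :: iterdecodeUnits rest

-- Stage 2 loop body: 'for u in reversed(units)' is a right fold; parts_rev with its
-- last element first and each part's chars reversed is exactly this Lean list state,
-- so the final double reversal in the Python is the identity here.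
def iterdecodeStep : Option Char → List (List Char) → List (List Char)
  | none, st => [] :: st
  | some c, p :: ps => (c :: p) :: ps
  | some c, [] => [[c]]                        -- unreachable: the state is never empty

def iterdecode_alt (value : String) : List String :=
  ((iterdecodeUnits value.toList).foldr iterdecodeStep [[]]).map (fun p => String.ofList p)

-- ===== PRECONDITION & SPEC =====
def Spec_iterdecode (value : String) (out : List String) : Prop := out = iterdecode_alt value
instance (value : String) (out : List String) : Decidable (Spec_iterdecode value out) := by unfold Spec_iterdecode; infer_instance

-- ===== CLAIM (what is proved, stated in full; the proofs are below) =====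
def Claim_equal_iterdecode : Prop := ∀ (value : String), Dom_iterdecode value → Spec_iterdecode value (iterdecode value)

-- ===== LEMMAS AND PROOFS =====

-- tokenization of the rest of the string when A is in the escaped state
def iterdecodeUnitsEsc : List Char → List (Option Char)
  | [] => []
  | c :: rest => some c :: iterdecodeUnits rest

-- prepend an accumulator onto the first part
def phL (accL : List Char) : List (List Char) → List (List Char)
  | [] => [accL]
  | p :: ps => (accL ++ p) :: ps

theorem foldr_step_ne_nil (us : List (Option Char)) :
    (us.foldr iterdecodeStep [[]]) ≠ [] := by
  induction us with
  | nil => simp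
  | cons u rest ih =>
    cases u with
    | none => simp [iterdecodeStep]
    | some c =>
      cases h : rest.foldr iterdecodeStep [[]] with
      | nil => exact absurd h ih
      | cons p ps => simp [iterdecodeStep, h]

theorem unitsGo_dot (rest : List Char) :
    iterdecodeUnits ('.' :: rest) = iterdecodeUnitsEsc rest := by
  rw [iterdecodeUnits.eq_def]
  cases rest <;> simp [iterdecodeUnitsEsc]

theorem unitsGo_sep (rest : List Char) :
    iterdecodeUnits (',' :: rest) = none :: iterdecodeUnits rest := by
  rw [iterdecodeUnits.eq_def]; simp

theorem unitsGo_other (c : Char) (rest : List Char) (h1 : ¬ c = '.') (h2 : ¬ c = ',') :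
    iterdecodeUnits (c :: rest) = some c :: iterdecodeUnits rest := by
  rw [iterdecodeUnits.eq_def]; simp [h1, h2]

theorem iterdecodeGoA_eq (chars : List Char) :
    ∀ (res : List String) (acc : String),
      iterdecodeGoA chars res acc false =
        res ++ (phL acc.toList ((iterdecodeUnits chars).foldr iterdecodeStep [[]])).map (fun p => String.ofList p) ∧
      iterdecodeGoA chars res acc true =
        res ++ (phL acc.toList ((iterdecodeUnitsEsc chars).foldr iterdecodeStep [[]])).map (fun p => String.ofList p) := by
  induction chars with
  | nil =>
    intro res acc
    simp [iterdecodeGoA, iterdecodeUnits, iterdecodeUnitsEsc, phL, String.ofList_toList]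
  | cons c rest ih =>
    intro res acc
    constructor
    · by_cases h1 : c = '.'
      · subst h1
        rw [unitsGo_dot]
        simpa [iterdecodeGoA] using (ih res acc).2
      · by_cases h2 : c = ','
        · subst h2
          rw [unitsGo_sep]
          have hmain := (ih (res ++ [acc]) "").1
          cases h : (iterdecodeUnits rest).foldr iterdecodeStep [[]] with
          | nil => exact absurd h (foldr_step_ne_nil _)
          | cons p ps =>
            simp only [List.foldr_cons, h] at *
            simp [iterdecodeGoA, h1, iterdecodeStep, phL] at hmain ⊢
            simp [hmain]
        · rw [unitsGo_other c rest h1 h2]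
          have hmain := (ih res (acc.push c)).1
          cases h : (iterdecodeUnits rest).foldr iterdecodeStep [[]] with
          | nil => exact absurd h (foldr_step_ne_nil _)
          | cons p ps =>
            simp only [List.foldr_cons, h] at *
            simp [iterdecodeGoA, h1, h2, iterdecodeStep, phL] at hmain ⊢
            simpa [String.toList_push] using hmain
    · simp only [iterdecodeUnitsEsc]
      have hmain := (ih res (acc.push c)).1
      cases h : (iterdecodeUnits rest).foldr iterdecodeStep [[]] with
      | nil => exact absurd h (foldr_step_ne_nil _)
      | cons p ps =>
        simp only [List.foldr_cons, h] at *
        simp [iterdecodeGoA, iterdecodeStep, phL] at hmain ⊢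
        simpa [String.toList_push] using hmain

-- ===== VERDICT (by name: the statement is the Claim_ definition above) =====
theorem iterdecode_spec : Claim_equal_iterdecode := by
  intro value _
  unfold Spec_iterdecode iterdecode iterdecode_alt
  have h := (iterdecodeGoA_eq value.toList [] "").1
  cases hfold : (iterdecodeUnits value.toList).foldr iterdecodeStep [[]] with
  | nil => exact absurd hfold (foldr_step_ne_nil _)
  | cons p ps => simpa [hfold, phL] using h
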